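-- pv_equiv track=rewrite | github.com/genggng/leetcode | 341-3.py | addMinimum
-- ===== SOURCE A (Python) =====
-- def addMinimum(word: str) -> int:
--     res = 0
--     t = ['a','b','c']
--     i = 0
--     k = 0
--     while k < len(word):
--         c = word[k]
--         cur_i = t.index(c)
--         if cur_i >= i:
--             dis = cur_i - i  #要补得单词
--             res += dis
--             i = (cur_i+1)%3
--             k += 1
--         else:  #补全
--             dis = 3 - i
--             res += dis
--             i = 0
--     else:
--         if i != 0:
--             dis = 3 - i
--             res += dis
--             i = 0
--     return res
-- ===== SOURCE B (Python) =====
-- def addMinimum(word: str) -> int: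
--     idx = ['abc'.index(c) for c in word]
--     if not idx:
--         return 0
--     groups = 1 + sum(1 for j in range(1, len(idx)) if idx[j] <= idx[j - 1])
--     return 3 * groups - len(idx)
-- ===== Notes on version B (the rewrite author's own statement) =====
-- stated objective: simpler
-- what changed: Replaces A's two-branch fill-as-you-go state machine (whose else branch re-processes the same character) with a one-pass closed form: map each char to its index in the pattern alphabet and return 3*(1 + number of non-increasing adjacent index pairs) - len(word).
import Mathlib
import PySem

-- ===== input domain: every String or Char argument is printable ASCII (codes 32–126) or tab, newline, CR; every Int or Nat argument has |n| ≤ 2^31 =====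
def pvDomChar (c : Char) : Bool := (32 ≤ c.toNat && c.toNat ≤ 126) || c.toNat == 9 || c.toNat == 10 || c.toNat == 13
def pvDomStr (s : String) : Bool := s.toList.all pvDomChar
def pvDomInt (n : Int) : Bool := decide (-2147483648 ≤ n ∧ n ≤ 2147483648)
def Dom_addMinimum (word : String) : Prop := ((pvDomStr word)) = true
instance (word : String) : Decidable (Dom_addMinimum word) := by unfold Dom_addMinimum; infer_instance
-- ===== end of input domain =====

-- B replaces A's two-branch state machine with a closed form 3*groups - len over the index
-- sequence (objective: simpler).  Both programs raise ValueError on chars outside 'abc'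
-- (excluded by Pre_); the ports return 0 on that raise path.

-- ===== PORT A =====
def pvABC : List Char := ['a', 'b', 'c']

-- the while-loop of A; `none` = the ValueError of t.index(c)
def pvALoop (cs : List Char) (i : Int) (res : Int) : Option Int :=
  match cs with
  | [] => some (if i ≠ 0 then res + (3 - i) else res)
  | c :: rest =>
    match PySem.List.index? pvABC c with
    | none => none
    | some ci =>
      if (ci : Int) ≥ i then
        pvALoop rest (PySem.Int.mod ((ci : Int) + 1) 3) (res + ((ci : Int) - i))
      else
        pvALoop (c :: rest) 0 (res + (3 - i))
termination_by (cs.length, i.toNat)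
decreasing_by
  · exact Prod.Lex.left _ _ (by simp)
  · exact Prod.Lex.right _ (by omega)

def addMinimum (word : String) : Int :=
  (pvALoop word.toList 0 0).getD 0

-- ===== PORT B =====
-- ['abc'.index(c) for c in word]; `none` = the ValueError at the first invalid char
def pvIdxList (cs : List Char) : Option (List Int) :=
  match cs with
  | [] => some []
  | c :: rest =>
    match PySem.List.index? pvABC c with
    | none => none
    | some x => (pvIdxList rest).map (fun l => (x : Int) :: l)

-- sum(1 for j in range(1, len(idx)) if idx[j] <= idx[j-1]), as a scan over adjacent pairs
def pvCountLE (l : List Int) : Int :=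
  match l with
  | x :: y :: r => (if y ≤ x then 1 else 0) + pvCountLE (y :: r)
  | _ => 0

def addMinimum_alt (word : String) : Int :=
  match pvIdxList word.toList with
  | none => 0
  | some [] => 0
  | some l => 3 * (1 + pvCountLE l) - l.length

-- ===== PRECONDITION & SPEC =====
-- Pre_ excludes exactly the words containing a char outside 'abc', on which A (and B) raise ValueError.
def Pre_addMinimum (word : String) : Prop := (word.toList.all (fun c => c ∈ pvABC)) = true
instance (word : String) : Decidable (Pre_addMinimum word) := by unfold Pre_addMinimum; infer_instance
def pvWitness_addMinimum : String := "acbccab"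

def Spec_addMinimum (word : String) (out : Int) : Prop := out = addMinimum_alt word
instance (word : String) (out : Int) : Decidable (Spec_addMinimum word out) := by unfold Spec_addMinimum; infer_instance

-- ===== CLAIM (what is proved, stated in full; the proofs are below) =====
def Claim_equal_addMinimum : Prop := ∀ (word : String), Dom_addMinimum word → Pre_addMinimum word → Spec_addMinimum word (addMinimum word)

-- ===== LEMMAS AND PROOFS =====

-- the index sequence of a valid word (proof-side helper)
def pvIdx (cs : List Char) : List Int :=
  cs.map (fun c => ((PySem.List.index? pvABC c).getD 0 : Int))

-- cost of A's loop from state i over an index sequence, one entry per char (fused else-then step)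
def pvC (i : Int) (l : List Int) : Int :=
  match l with
  | [] => if i ≠ 0 then 3 - i else 0
  | x :: r => (x - i) + (if x < i then 3 else 0) + pvC (PySem.Int.mod (x + 1) 3) r

lemma pv_index_abc {c : Char} (hc : c ∈ pvABC) :
    ∃ x : Nat, PySem.List.index? pvABC c = some x ∧ x < 3 := by
  simp only [pvABC, List.mem_cons, List.not_mem_nil, or_false] at hc
  rcases hc with rfl | rfl | rfl
  · exact ⟨0, by decide, by decide⟩
  · exact ⟨1, by decide, by decide⟩
  · exact ⟨2, by decide, by decide⟩

lemma pv_step {c : Char} {x : Nat} (cs : List Char) (i res : Int)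
    (hx : PySem.List.index? pvABC c = some x) :
    pvALoop (c :: cs) i res =
      pvALoop cs (PySem.Int.mod ((x : Int) + 1) 3) (res + ((x : Int) - i) + (if (x : Int) < i then 3 else 0)) := by
  rw [pvALoop, hx]
  dsimp only
  by_cases h : (x : Int) ≥ i
  · rw [if_pos h, if_neg (by omega)]
    ring_nf
  · rw [if_neg h, pvALoop, hx]
    dsimp only
    rw [if_pos (by omega), if_pos (by omega)]
    ring_nf

lemma pv_loop_eq_C (cs : List Char) (i res : Int)
    (hv : ∀ c ∈ cs, c ∈ pvABC) (hi0 : 0 ≤ i) :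
    pvALoop cs i res = some (res + pvC i (pvIdx cs)) := by
  induction cs generalizing i res with
  | nil =>
    rw [pvALoop]
    simp only [pvIdx, List.map_nil, pvC]
    split_ifs <;> ring_nf
  | cons c rest ih =>
    obtain ⟨x, hx, hx3⟩ := pv_index_abc (hv c (List.mem_cons_self ..))
    rw [pv_step rest i res hx]
    rw [ih _ _ (fun d hd => hv d (List.mem_cons_of_mem _ hd))
        (by interval_cases x <;> decide)]
    simp only [pvIdx, List.map_cons, hx, Option.getD_some, pvC]
    congr 1
    ring_nf

lemma pv_C_closed (l : List Int) (hl : ∀ x ∈ l, 0 ≤ x ∧ x < 3) (p : Int)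
    (hp0 : 0 ≤ p) (hp3 : p < 3) :
    pvC (PySem.Int.mod (p + 1) 3) l = 3 * pvCountLE (p :: l) - l.length + 2 - p := by
  induction l generalizing p with
  | nil =>
    simp only [pvC, pvCountLE, List.length_nil]
    interval_cases p <;> decide
  | cons x r ih =>
    obtain ⟨hx0, hx3⟩ := hl x (List.mem_cons_self ..)
    rw [pvC, ih (fun y hy => hl y (List.mem_cons_of_mem _ hy)) x hx0 hx3]
    show _ = 3 * ((if x ≤ p then 1 else 0) + pvCountLE (x :: r)) - ((x :: r).length : Int) + 2 - p
    simp only [List.length_cons]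
    push_cast
    have : ((x : Int) - PySem.Int.mod (p + 1) 3) + (if x < PySem.Int.mod (p + 1) 3 then 3 else 0)
        = 3 * (if x ≤ p then 1 else 0) - 1 + x - p := by
      interval_cases p <;> interval_cases x <;> decide
    omega

lemma pv_idxList_eq (cs : List Char) (hv : ∀ c ∈ cs, c ∈ pvABC) :
    pvIdxList cs = some (pvIdx cs) := by
  induction cs with
  | nil => rfl
  | cons c rest ih =>
    obtain ⟨x, hx, _⟩ := pv_index_abc (hv c (List.mem_cons_self ..))
    rw [pvIdxList]
    rw [PySem.List.index?_eq_idxOf?] at hx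
    simp [hx, ih (fun d hd => hv d (List.mem_cons_of_mem _ hd)), pvIdx]

lemma pv_idx_valid (cs : List Char) (hv : ∀ c ∈ cs, c ∈ pvABC) :
    ∀ x ∈ pvIdx cs, 0 ≤ x ∧ x < 3 := by
  intro x hx
  simp only [pvIdx, List.mem_map] at hx
  obtain ⟨c, hc, rfl⟩ := hx
  obtain ⟨k, hk, hk3⟩ := pv_index_abc (hv c hc)
  rw [hk]
  simp
  omega

-- ===== VERDICT (by name: the statement is the Claim_ definition above) =====
theorem addMinimum_spec : Claim_equal_addMinimum := by
  intro word _ hpre'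
  have hpre : ∀ c ∈ word.toList, c ∈ pvABC := by
    simpa [Pre_addMinimum, List.all_eq_true] using hpre'
  unfold Spec_addMinimum addMinimum addMinimum_alt
  rw [pv_loop_eq_C word.toList 0 0 hpre le_rfl, pv_idxList_eq word.toList hpre]
  have hval := pv_idx_valid word.toList hpre
  cases h : pvIdx word.toList with
  | nil => simp [pvC]
  | cons x r =>
    rw [h] at hval
    obtain ⟨hx0, hx3⟩ := hval x (List.mem_cons_self ..)
    rw [Option.getD_some]
    rw [pvC]
    rw [pv_C_closed r (fun y hy => hval y (List.mem_cons_of_mem _ hy)) x hx0 hx3]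
    show _ = 3 * (1 + pvCountLE (x :: r)) - ((x :: r).length : Int)
    simp only [List.length_cons]
    rw [if_neg (by omega : ¬ (x : Int) < 0)]
    push_cast
    omega
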